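-- pv_equiv track=rewrite | github.com/seijasdz/alagene | predictor_service/gene_predictor.py | get_exons
-- ===== SOURCE A (Python) =====
-- def get_exons(seq):
--     in_cds = False
--     cuts = []
--     start = -1
--     start_s = ''
--     start_zones = ['utr exon', 'start zone7', 'acceptor014', 'acceptor114', 'acceptor214']
--     stop_zones = ['donorx00', 'donor03', 'donor14', 'donor25', 'poly a zone 0']
--     for i, part in enumerate(seq):
--         if part in start_zones and not in_cds:
--             in_cds = True
--             start = i
--             start_s = part
--         elif part in stop_zones and in_cds:
--             in_cds = False
--             cuts.append((start, i))
--         elif in_cds and i == len(seq) - 1: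
--             cuts.append((start, i))
--     return cuts
-- ===== SOURCE B (Python) =====
-- def get_exons(seq):
--     START = ('utr exon', 'start zone7', 'acceptor014', 'acceptor114', 'acceptor214')
--     STOP = ('donorx00', 'donor03', 'donor14', 'donor25', 'poly a zone 0')
--     n = len(seq)
--     cuts = []
--     i = 0
--     while i < n:
--         if seq[i] in START:
--             start = i
--             j = i + 1
--             while j < n and seq[j] not in STOP:
--                 j += 1
--             if j < n:
--                 cuts.append((start, j))
--             elif start < n - 1:
--                 cuts.append((start, n - 1))
--             i = j + 1
--         else:
--             i += 1
--     return cuts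
-- ===== Notes on version B (the rewrite author's own statement) =====
-- stated objective: alternative
-- what changed: Replaces A's single pass with a flag/state machine by a find-then-scan nested loop: an outer index finds the next start zone, an inner index scans forward to the first stop zone (or the end), and scanning resumes after the stop.
import Mathlib
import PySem

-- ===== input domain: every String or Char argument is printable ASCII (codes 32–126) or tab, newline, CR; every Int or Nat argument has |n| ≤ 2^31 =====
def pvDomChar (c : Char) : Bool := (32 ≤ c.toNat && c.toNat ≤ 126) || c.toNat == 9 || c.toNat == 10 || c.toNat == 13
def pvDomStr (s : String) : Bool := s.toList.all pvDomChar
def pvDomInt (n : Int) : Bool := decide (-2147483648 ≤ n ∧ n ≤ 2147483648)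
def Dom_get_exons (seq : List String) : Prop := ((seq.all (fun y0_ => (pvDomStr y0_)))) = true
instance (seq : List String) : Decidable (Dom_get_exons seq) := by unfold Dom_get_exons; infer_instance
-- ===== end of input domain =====

-- B replaces A's flag-based single pass by a find-start / scan-to-stop nested loop (alternative decomposition, same cost).

-- ===== PORT A =====
def startZones : List String := ["utr exon", "start zone7", "acceptor014", "acceptor114", "acceptor214"]
def stopZones : List String := ["donorx00", "donor03", "donor14", "donor25", "poly a zone 0"]

-- state = (in_cds, start, start_s, cuts), exactly A's loop body
def aStep (n : Int) (st : Bool × Int × String × List (Int × Int)) (ix : Int × String) :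
    Bool × Int × String × List (Int × Int) :=
  if ix.2 ∈ startZones ∧ st.1 = false then (true, ix.1, ix.2, st.2.2.2)
  else if ix.2 ∈ stopZones ∧ st.1 = true then (false, st.2.1, st.2.2.1, st.2.2.2 ++ [(st.2.1, ix.1)])
  else if st.1 = true ∧ ix.1 = (n : Int) - 1 then (st.1, st.2.1, st.2.2.1, st.2.2.2 ++ [(st.2.1, ix.1)])
  else st

def get_exons (seq : List String) : List (Int × Int) :=
  ((PySem.List.enumerate seq 0).foldl (aStep (seq.length : Int)) (false, -1, "", [])).2.2.2

-- ===== PORT B =====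
mutual
-- outer loop of Source B: advance i until a start zone is found (rest = seq[i:])
def bScanStart : List String → Int → Int → List (Int × Int)
  | [], _, _ => []
  | p :: rest, i, n =>
    if p ∈ startZones then bScanStop rest i (i + 1) n else bScanStart rest (i + 1) n

-- inner loop of Source B: from index j with open region started at s, scan to the first stop zone
def bScanStop : List String → Int → Int → Int → List (Int × Int)
  | [], s, _, n => if s < n - 1 then [(s, n - 1)] else []   -- inner scan hit the end (j = n)
  | p :: rest, s, j, n =>
    if p ∈ stopZones then (s, j) :: bScanStart rest (j + 1) n else bScanStop rest s (j + 1) n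
end

def get_exons_alt (seq : List String) : List (Int × Int) :=
  bScanStart seq 0 (seq.length : Int)

-- ===== PRECONDITION & SPEC =====
def Spec_get_exons (seq : List String) (out : List (Int × Int)) : Prop := out = get_exons_alt seq
instance (seq : List String) (out : List (Int × Int)) : Decidable (Spec_get_exons seq out) := by unfold Spec_get_exons; infer_instance

-- ===== CLAIM (what is proved, stated in full; the proofs are below) =====
def Claim_equal_get_exons : Prop := ∀ (seq : List String), Dom_get_exons seq → Spec_get_exons seq (get_exons seq)

-- ===== LEMMAS AND PROOFS =====

-- A's fold from index i over the remaining suffix equals B's scanner in the corresponding mode.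
theorem fold_eq_scan (rest : List String) : ∀ (i : Int) (flag : Bool) (s : Int) (ss : String)
    (acc : List (Int × Int)) (n : Int), i + rest.length = n → (flag = true → s < i) →
    (flag = false ∨ rest ≠ []) →
    ((PySem.List.enumerate rest i).foldl (aStep n) (flag, s, ss, acc)).2.2.2
      = acc ++ (if flag then bScanStop rest s i n else bScanStart rest i n) := by
  induction rest with
  | nil =>
    intro i flag s ss acc n hn hs hf
    rcases hf with hf | hf
    · subst hf; simp [PySem.List.enumerate, bScanStart]
    · exact absurd rfl hf
  | cons x rest' IH =>
    intro i flag s ss acc n hn hs hf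
    rw [PySem.List.enumerate_cons]
    simp only [List.foldl_cons]
    rcases Decidable.em (rest' = []) with hre | hre
    · -- last element: i = n - 1
      subst hre
      have hi : i = n - 1 := by simp at hn; omega
      cases flag with
      | false =>
        by_cases hx : x ∈ startZones
        · have : aStep n (false, s, ss, acc) (i, x) = (true, i, x, acc) := by
            simp [aStep, hx]
          rw [this]
          simp [PySem.List.enumerate, bScanStart, bScanStop, hx, hi]
        · have : aStep n (false, s, ss, acc) (i, x) = (false, s, ss, acc) := by
            simp [aStep, hx]
          rw [this]
          simp [PySem.List.enumerate, bScanStart, hx]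
      | true =>
        have hsi : s < i := hs rfl
        by_cases hx : x ∈ stopZones
        · have : aStep n (true, s, ss, acc) (i, x) = (false, s, ss, acc ++ [(s, i)]) := by
            simp [aStep, hx]
          rw [this]
          simp [PySem.List.enumerate, bScanStop, bScanStart, hx]
        · have : aStep n (true, s, ss, acc) (i, x) = (true, s, ss, acc ++ [(s, i)]) := by
            simp [aStep, hx, hi]
          rw [this]
          have hsn : s < n - 1 := by omega
          simp [PySem.List.enumerate, bScanStop, hx, hsn, hi]
    · -- not the last element: i ≠ n - 1
      have hlen : (1 : Int) ≤ rest'.length := by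
        cases rest' with
        | nil => exact absurd rfl hre
        | cons a b => simp
      have hni : i ≠ n - 1 := by simp at hn; omega
      have hn' : i + 1 + (rest'.length : Int) = n := by simp at hn ⊢; omega
      cases flag with
      | false =>
        by_cases hx : x ∈ startZones
        · have : aStep n (false, s, ss, acc) (i, x) = (true, i, x, acc) := by
            simp [aStep, hx]
          rw [this, IH (i + 1) true i x acc n hn' (fun _ => by omega) (Or.inr hre)]
          simp [bScanStart, hx]
        · have : aStep n (false, s, ss, acc) (i, x) = (false, s, ss, acc) := by
            simp [aStep, hx]
          rw [this, IH (i + 1) false s ss acc n hn' (by intro h; cases h) (Or.inl rfl)]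
          simp [bScanStart, hx]
      | true =>
        have hsi : s < i := hs rfl
        by_cases hx : x ∈ stopZones
        · have : aStep n (true, s, ss, acc) (i, x) = (false, s, ss, acc ++ [(s, i)]) := by
            simp [aStep, hx]
          rw [this, IH (i + 1) false s ss (acc ++ [(s, i)]) n hn' (by intro h; cases h) (Or.inl rfl)]
          simp [bScanStop, hx]
        · have : aStep n (true, s, ss, acc) (i, x) = (true, s, ss, acc) := by
            simp [aStep, hx, hni]
          rw [this, IH (i + 1) true s ss acc n hn' (fun _ => by omega) (Or.inr hre)]
          simp [bScanStop, hx]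

-- ===== VERDICT (by name: the statement is the Claim_ definition above) =====
theorem get_exons_spec : Claim_equal_get_exons := by
  intro seq _
  unfold Spec_get_exons get_exons get_exons_alt
  rw [fold_eq_scan seq 0 false (-1) "" [] (seq.length : Int) (by simp) (by intro h; cases h)
      (Or.inl rfl)]
  simp
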